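-- pv_equiv track=rewrite | github.com/rokino0827-cpu/framing_analyzer | bias_teacher.py | optimize_batching
-- ===== SOURCE A (Python) =====
-- from typing import List, Dict, Tuple, Optional
--
-- def optimize_batching(fragments: List[Dict], batch_size: int) -> List[List[Dict]]:
--     """优化批量处理"""
--     # 按长度分组
--     length_groups = {}
--     for fragment in fragments:
--         length = fragment.get('estimated_tokens', 0)
--         # 将长度归类到最近的50的倍数
--         length_bucket = (length // 50) * 50
--         if length_bucket not in length_groups:
--             length_groups[length_bucket] = []
--         length_groups[length_bucket].append(fragment)
--
--     # 创建优化的批次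
--     batches = []
--     for length_bucket in sorted(length_groups.keys()):
--         group_fragments = length_groups[length_bucket]
--
--         # 将同长度组的片段分批
--         for i in range(0, len(group_fragments), batch_size):
--             batch = group_fragments[i:i + batch_size]
--             batches.append(batch)
--
--     return batches
-- ===== SOURCE B (Python) =====
-- from typing import List, Dict
--
--
-- def optimize_batching(fragments: List[Dict], batch_size: int) -> List[List[Dict]]:
--     """Chunk fragments into batches, bucketed by token length (multiples of 50)."""
--     bucket = lambda f: (f.get('estimated_tokens', 0) // 50) * 50
--     batches = []
--     for b in sorted({bucket(f) for f in fragments}):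
--         group = [f for f in fragments if bucket(f) == b]
--         for i in range(0, len(group), batch_size):
--             batches.append(group[i:i + batch_size])
--     return batches
-- ===== Notes on version B (the rewrite author's own statement) =====
-- stated objective: alternative
-- what changed: B drops A's dict-accumulation grouping: it sorts the distinct length buckets once and materialises each group with a single filter pass over fragments, keeping the range-slicing chunk loop identical.
import Mathlib
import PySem

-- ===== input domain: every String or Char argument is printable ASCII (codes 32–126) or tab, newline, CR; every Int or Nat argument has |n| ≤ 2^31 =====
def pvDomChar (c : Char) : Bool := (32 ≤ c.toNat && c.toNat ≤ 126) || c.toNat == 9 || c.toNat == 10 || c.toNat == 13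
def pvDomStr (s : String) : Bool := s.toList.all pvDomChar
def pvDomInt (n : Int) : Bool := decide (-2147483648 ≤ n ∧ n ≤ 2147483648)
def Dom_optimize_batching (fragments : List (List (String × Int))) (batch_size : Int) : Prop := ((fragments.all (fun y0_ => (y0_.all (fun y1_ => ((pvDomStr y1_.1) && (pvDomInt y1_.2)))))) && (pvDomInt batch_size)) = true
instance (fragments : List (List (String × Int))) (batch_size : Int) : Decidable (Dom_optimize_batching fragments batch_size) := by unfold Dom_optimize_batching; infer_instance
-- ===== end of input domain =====

-- B replaces A's dict-accumulation grouping by "sorted distinct buckets, then one filter pass per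
-- bucket" (objective: simpler/alternative); the chunking loop is kept identical.

-- shared helper: the length bucket of a fragment, (fragment.get('estimated_tokens', 0) // 50) * 50
def pvBucket (fragment : List (String × Int)) : Int :=
  PySem.Int.floordiv ((PySem.Dict.mk fragment).getD "estimated_tokens" 0) 50 * 50

-- ===== PORT A =====
def optimize_batching (fragments : List (List (String × Int))) (batch_size : Int) : List (List (List (String × Int))) :=
  let length_groups : PySem.Dict Int (List (List (String × Int))) :=
    fragments.foldl (fun d fragment =>
      let length_bucket := pvBucket fragment
      -- if length_bucket not in length_groups: length_groups[length_bucket] = []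
      let d := if d.contains length_bucket then d else d.insert length_bucket []
      -- length_groups[length_bucket].append(fragment)
      d.modify length_bucket [] (fun g => g ++ [fragment])) PySem.Dict.empty
  (PySem.List.sorted length_groups.keys (fun x => x) false).foldl (fun batches length_bucket =>
    -- length_groups[length_bucket]: key is always present, so getD is exact here
    let group_fragments := length_groups.getD length_bucket []
    (PySem.List.pyRange 0 (group_fragments.length : Int) batch_size).foldl
      (fun batches i => batches ++ [PySem.List.slice group_fragments (some i) (some (i + batch_size))])
      batches) []

-- ===== PORT B =====
def optimize_batching_alt (fragments : List (List (String × Int))) (batch_size : Int) : List (List (List (String × Int))) :=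
  (PySem.List.sorted (PySem.Set.ofList (fragments.map pvBucket)) (fun x => x) false).foldl
    (fun batches b =>
      let group := fragments.filter (fun f => pvBucket f == b)
      (PySem.List.pyRange 0 (group.length : Int) batch_size).foldl
        (fun batches i => batches ++ [PySem.List.slice group (some i) (some (i + batch_size))])
        batches) []

-- ===== PRECONDITION & SPEC =====
-- Pre_ excludes only batch_size = 0 with nonempty fragments, where A raises ValueError (range step 0).
def Pre_optimize_batching (fragments : List (List (String × Int))) (batch_size : Int) : Prop :=
  fragments = [] ∨ batch_size ≠ 0
instance (fragments : List (List (String × Int))) (batch_size : Int) : Decidable (Pre_optimize_batching fragments batch_size) := by unfold Pre_optimize_batching; infer_instance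

def pvWitness_optimize_batching : (List (List (String × Int))) × Int :=
  ([[("estimated_tokens", 30)], [("estimated_tokens", 120)], [], [("estimated_tokens", 60)]], 2)

def Spec_optimize_batching (fragments : List (List (String × Int))) (batch_size : Int) (out : List (List (List (String × Int)))) : Prop := out = optimize_batching_alt fragments batch_size
instance (fragments : List (List (String × Int))) (batch_size : Int) (out : List (List (List (String × Int)))) : Decidable (Spec_optimize_batching fragments batch_size out) := by unfold Spec_optimize_batching; infer_instance

-- ===== CLAIM (what is proved, stated in full; the proofs are below) =====
def Claim_equal_optimize_batching : Prop := ∀ (fragments : List (List (String × Int))) (batch_size : Int), Dom_optimize_batching fragments batch_size → Pre_optimize_batching fragments batch_size → Spec_optimize_batching fragments batch_size (optimize_batching fragments batch_size)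

-- ===== LEMMAS AND PROOFS =====

-- A's "setdefault then append" step is one Dict.modify.
theorem pv_step_modify (d : PySem.Dict Int (List (List (String × Int)))) (b : Int)
    (f : List (String × Int)) :
    (if d.contains b then d else d.insert b []).modify b [] (fun g => g ++ [f])
      = d.modify b [] (fun g => g ++ [f]) := by
  split_ifs with h
  · rfl
  · have h' : d.contains b = false := by simpa using h
    simp [PySem.Dict.modify, h,
      PySem.Dict.getD_of_not_contains, PySem.Dict.getD_insert_self,
      PySem.Dict.insert_insert_self]

-- the groups dict A builds
def pvGroups (fragments : List (List (String × Int))) : PySem.Dict Int (List (List (String × Int))) :=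
  fragments.foldl (fun d f => d.modify (pvBucket f) [] (fun g => g ++ [f])) PySem.Dict.empty

theorem pvGroups_getD (fragments : List (List (String × Int))) (b : Int) :
    (pvGroups fragments).getD b [] = fragments.filter (fun f => pvBucket f == b) := by
  have h := PySem.Dict.getD_foldl_modify_append
    (l := fragments.map (fun f => (pvBucket f, f))) (d := PySem.Dict.empty) (c := b)
  rw [List.foldl_map] at h
  unfold pvGroups
  simp only [h, PySem.Dict.getD_empty, List.nil_append, List.filter_map]
  simp [Function.comp_def]

theorem pvGroups_keys (fragments : List (List (String × Int))) :
    (pvGroups fragments).keys = PySem.Set.ofList (fragments.map pvBucket) := by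
  unfold pvGroups
  rw [PySem.Dict.keys_foldl_modify_key]
  simp [PySem.Set.update, PySem.Set.ofList_eq_foldl, PySem.Dict.keys_empty]

-- ===== VERDICT (by name: the statement is the Claim_ definition above) =====
theorem optimize_batching_spec : Claim_equal_optimize_batching := by
  intro fragments batch_size _ _
  unfold Spec_optimize_batching optimize_batching optimize_batching_alt
  have hfold : fragments.foldl (fun d fragment =>
      let length_bucket := pvBucket fragment
      let d := if d.contains length_bucket then d else d.insert length_bucket []
      d.modify length_bucket [] (fun g => g ++ [fragment])) PySem.Dict.empty = pvGroups fragments := by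
    unfold pvGroups
    congr 1
    funext d f
    exact pv_step_modify d (pvBucket f) f
  simp only [hfold, pvGroups_keys, pvGroups_getD]
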